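-- pv_equiv track=rewrite | github.com/SupermanBrady/tj-focs | unit 2/unit 2/2-red-02.py | affine_n_encode
-- ===== SOURCE A (Python) =====
-- alpha = "ABCDEFGHIJKLMNOPQRSTUVWXYZ"
--
-- def convert_to_num(ngraph):
--     numerical = []
--     for i, letter in enumerate(ngraph):
--         numerical.append(alpha.index(letter) * (26**i))
--     return sum(numerical)
--
-- def convert_to_text(num, n):
--     if n == 1:
--         return alpha[num]
--     else:
--         x = alpha[num % 26]
--         return x + convert_to_text(num // 26, n - 1)
--
-- def affine_n_encode(text, n, a, b):
--     textlist = [] #a list of every letter in text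
--     ngraphs = [] #a list of all the ngraphs
--     encnumbers = [] #the new numbers
--     decgraphs = []
--     for letter in text:
--         textlist.append(letter)
--     r = len(text) % n
--     if r != 0:
--         for i in range(n - r):
--             textlist.append("X")
--     for i in range(0, len(text), n):
--         ngraphs.append(textlist[i : i + n])
--
--     for ngraph in ngraphs:
--         i = convert_to_num(ngraph)
--         encnumbers.append((a*i + b) % 26**n)
--     for num in encnumbers:
--         decgraphs.append(convert_to_text(num, n))
--     st = "".join(decgraphs)
--     return st
-- ===== SOURCE B (Python) =====
-- alpha = "ABCDEFGHIJKLMNOPQRSTUVWXYZ"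
--
-- def affine_n_encode(text, n, a, b):
--     # single fused pass: pad, then per block Horner-fold the value and
--     # iteratively peel digits back into letters
--     chars = list(text)
--     pad = (-len(text)) % n
--     chars += ["X"] * pad
--     m = 26 ** n
--     out = []
--     for i in range(0, len(text), n):
--         block = chars[i:i + n]
--         val = 0
--         for ch in reversed(block):
--             val = val * 26 + alpha.index(ch)
--         num = (a * val + b) % m
--         s = ""
--         for _ in range(n):
--             s += alpha[num % 26]
--             num //= 26
--         out.append(s)
--     return "".join(out)
-- ===== Notes on version B (the rewrite author's own statement) =====
-- stated objective: alternative
-- what changed: The four sequential list-building passes (collect letters, pad, cut blocks, encode, decode) are fused into one loop over block starts that computes each block's value by a little-endian Horner fold over the reversed block and expands the encoded number back to letters with an iterative digit-peeling loop instead of the recursive convert_to_text.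
import Mathlib
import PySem

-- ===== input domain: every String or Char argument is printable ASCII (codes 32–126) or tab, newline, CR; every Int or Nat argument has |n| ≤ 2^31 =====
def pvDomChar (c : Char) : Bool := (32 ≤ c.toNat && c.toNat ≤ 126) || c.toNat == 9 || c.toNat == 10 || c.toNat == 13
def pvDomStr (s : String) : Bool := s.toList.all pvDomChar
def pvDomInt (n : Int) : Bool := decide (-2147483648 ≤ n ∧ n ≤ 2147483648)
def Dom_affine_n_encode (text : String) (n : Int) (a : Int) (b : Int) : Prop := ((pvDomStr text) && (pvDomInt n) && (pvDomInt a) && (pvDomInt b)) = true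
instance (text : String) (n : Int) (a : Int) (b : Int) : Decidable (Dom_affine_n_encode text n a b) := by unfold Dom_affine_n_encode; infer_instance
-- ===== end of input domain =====

-- B fuses A's four list-building passes into one loop over block starts with a
-- Horner fold for the block value and an iterative digit-peeling expansion
-- (objective: alternative decomposition, same cost).

-- ===== PORT A =====

-- alpha = "ABCDEFGHIJKLMNOPQRSTUVWXYZ"
def pvAlpha : List Char := "ABCDEFGHIJKLMNOPQRSTUVWXYZ".toList

-- alpha.index(c); Python raises ValueError when c is absent (excluded by Pre_),
-- so the default 0 is never reached on admitted inputs.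
def pvIdx (c : Char) : Int := ((pvAlpha.findIdx? (· == c)).getD 0 : Nat)

-- convert_to_num: loop appending alpha.index(letter) * 26**i, then sum
def convert_to_num (ngraph : List Char) : Int :=
  ((PySem.List.enumerate ngraph).foldl
    (fun acc p => acc ++ [pvIdx p.2 * 26 ^ p.1.toNat]) []).sum

-- convert_to_text, recursion on n; Python diverges for n ≤ 0 (never called
-- there: for n < 0 there are no blocks), so fuel n.toNat is exact where called.
def convert_to_text_go (num : Int) : Nat → String
  | 0 => ""
  | 1 => String.singleton ((PySem.List.pyGet? pvAlpha num).getD ' ')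
  | (k + 2) =>
      String.singleton ((PySem.List.pyGet? pvAlpha (PySem.Int.mod num 26)).getD ' ')
        ++ convert_to_text_go (PySem.Int.floordiv num 26) (k + 1)

def convert_to_text (num : Int) (n : Int) : String := convert_to_text_go num n.toNat

def affine_n_encode (text : String) (n : Int) (a : Int) (b : Int) : String :=
  let textlist := text.toList.foldl (fun acc c => acc ++ [c]) []
  let r := PySem.Int.mod (PySem.Str.len text) n
  let textlist :=
    if r ≠ 0 then (PySem.List.pyRange 0 (n - r) 1).foldl (fun acc _ => acc ++ ['X']) textlist
    else textlist
  let ngraphs := (PySem.List.pyRange 0 (PySem.Str.len text) n).foldl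
    (fun acc i => acc ++ [PySem.List.slice textlist (some i) (some (i + n))]) []
  -- 26**n: exact for n > 0; for n < 0 Python's float 26**n is never used (no blocks)
  let encnumbers := ngraphs.foldl
    (fun acc g => acc ++ [PySem.Int.mod (a * convert_to_num g + b) (26 ^ n.toNat)]) []
  let decgraphs := encnumbers.foldl (fun acc m => acc ++ [convert_to_text m n]) []
  PySem.Str.join "" decgraphs

-- ===== PORT B =====

-- body of B's inner 'for _ in range(n)' loop: s += alpha[num % 26]; num //= 26
def pvStep (st : String × Int) : String × Int :=
  (st.1 ++ String.singleton ((PySem.List.pyGet? pvAlpha (PySem.Int.mod st.2 26)).getD ' '),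
   PySem.Int.floordiv st.2 26)

def affine_n_encode_alt (text : String) (n : Int) (a : Int) (b : Int) : String :=
  let chars := text.toList
  let pad := PySem.Int.mod (-(PySem.Str.len text)) n
  let chars := chars ++ List.replicate pad.toNat 'X'   -- ["X"] * pad (empty for pad ≤ 0)
  -- m = 26**n: exact for n > 0; for n < 0 Python's float is never used (no blocks)
  let m := 26 ^ n.toNat
  let enc := fun (i : Int) =>
    let block := PySem.List.slice chars (some i) (some (i + n))
    let val := block.reverse.foldl (fun v c => v * 26 + pvIdx c) 0
    let num := PySem.Int.mod (a * val + b) m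
    ((List.range n.toNat).foldl (fun st _ => pvStep st) ("", num)).1
  PySem.Str.join "" ((PySem.List.pyRange 0 (PySem.Str.len text) n).map enc)

-- ===== PRECONDITION & SPEC =====
-- Pre_ excludes exactly where A raises: n = 0 (ZeroDivisionError in len(text) % n)
-- and, for n > 0, any character outside A-Z (ValueError in alpha.index).
-- For n < 0 A returns "" on any text, and those inputs are admitted.
def Pre_affine_n_encode (text : String) (n : Int) (a : Int) (b : Int) : Prop :=
  n ≠ 0 ∧ (0 < n → text.toList.all (fun c => 'A' ≤ c && c ≤ 'Z') = true)
instance (text : String) (n : Int) (a : Int) (b : Int) : Decidable (Pre_affine_n_encode text n a b) := by unfold Pre_affine_n_encode; infer_instance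

def pvWitness_affine_n_encode : String × Int × Int × Int := ("HELLO", 2, 3, 4)

def Spec_affine_n_encode (text : String) (n : Int) (a : Int) (b : Int) (out : String) : Prop := out = affine_n_encode_alt text n a b
instance (text : String) (n : Int) (a : Int) (b : Int) (out : String) : Decidable (Spec_affine_n_encode text n a b out) := by unfold Spec_affine_n_encode; infer_instance

-- ===== CLAIM (what is proved, stated in full; the proofs are below) =====
def Claim_equal_affine_n_encode : Prop := ∀ (text : String) (n : Int) (a : Int) (b : Int), Dom_affine_n_encode text n a b → Pre_affine_n_encode text n a b → Spec_affine_n_encode text n a b (affine_n_encode text n a b)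

-- ===== LEMMAS AND PROOFS =====

theorem pv_pyRange_neg_nil (a b s : Int) (hs : s < 0) (hab : a ≤ b) :
    PySem.List.pyRange a b s = [] := by
  simp only [PySem.List.pyRange]
  split_ifs with h1 h2 h3 <;> first | rfl | omega

theorem pv_foldl_ignore {α β : Type} (f : α → α) :
    ∀ (l : List β) (st : α), l.foldl (fun st _ => f st) st = f^[l.length] st
  | [], _ => rfl
  | _ :: l, st => by
      simp only [List.foldl_cons, List.length_cons, Function.iterate_succ_apply,
        pv_foldl_ignore f l]

-- the padding amounts agree: (-len) % n  =  (n - len % n if len % n ≠ 0 else 0)  for n > 0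
theorem pv_pad_eq (len n : Int) (hn : 0 < n) :
    (PySem.Int.mod (-len) n).toNat
      = (if PySem.Int.mod len n ≠ 0 then (n - PySem.Int.mod len n).toNat else 0) := by
  rw [PySem.Int.mod_eq_emod_of_pos hn, PySem.Int.mod_eq_emod_of_pos hn]
  have key : len % n + n * (len / n) = len := Int.emod_add_mul_ediv len n
  have h2 : 0 ≤ len % n := Int.emod_nonneg len (by omega)
  have h3 : len % n < n := Int.emod_lt_of_pos len hn
  by_cases h : len % n = 0
  · simp only [h, ne_eq, not_true_eq_false, if_false]
    have e : -len = (-(len / n)) * n := by linear_combination key - h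
    rw [e, Int.mul_emod_left]
    rfl
  · simp only [ne_eq, h, not_false_eq_true, if_true]
    have e : -len = (n - len % n) + n * (-(len / n) - 1) := by linear_combination key
    rw [e, Int.add_mul_emod_self_left, Int.emod_eq_of_lt (by omega) (by omega)]

-- the padded character lists of A and B coincide (n > 0)
theorem pv_padlist_eq (text : String) (n : Int) (hpos : 0 < n) :
    (if PySem.Int.mod (PySem.Str.len text) n ≠ 0 then
        List.foldl (fun acc _ => acc ++ ['X']) text.toList
          (PySem.List.pyRange 0 (n - PySem.Int.mod (PySem.Str.len text) n))
      else text.toList)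
      = text.toList ++ List.replicate (PySem.Int.mod (-PySem.Str.len text) n).toNat 'X' := by
  rw [pv_pad_eq _ _ hpos]
  by_cases h : PySem.Int.mod (PySem.Str.len text) n = 0
  · simp only [h, ne_eq, not_true_eq_false, if_false, List.replicate_zero, List.append_nil]
  · simp only [h, ne_eq, not_false_eq_true, if_true]
    rw [PySem.List.foldl_append_singleton_eq_map]
    rw [List.map_const', PySem.List.length_pyRange_one]
    norm_num

-- recursive little-endian value (shared spec of both block-value computations)
def pvNumVal : List Char → Int
  | [] => 0
  | c :: l => pvIdx c + 26 * pvNumVal l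

theorem pv_convert_to_num_aux (l : List Char) :
    ∀ s : Nat, ((PySem.List.enumerate l (s : Int)).map
        (fun p => pvIdx p.2 * 26 ^ p.1.toNat)).sum = 26 ^ s * pvNumVal l := by
  induction l with
  | nil => intro s; simp [pvNumVal, PySem.List.enumerate_nil]
  | cons c l ih =>
      intro s
      rw [PySem.List.enumerate_cons]
      have hcast : (s : Int) + 1 = ((s + 1 : Nat) : Int) := by push_cast; ring
      simp only [List.map_cons, List.sum_cons, hcast, ih (s + 1), pvNumVal]
      have : ((s : Int)).toNat = s := Int.toNat_natCast s
      rw [this]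
      ring

theorem pv_foldr_numVal (l : List Char) :
    l.foldr (fun c v => v * 26 + pvIdx c) 0 = pvNumVal l := by
  induction l with
  | nil => rfl
  | cons c l ih => simp only [List.foldr_cons, ih, pvNumVal]; ring

theorem pv_horner_eq (l : List Char) :
    l.reverse.foldl (fun v c => v * 26 + pvIdx c) 0 = convert_to_num l := by
  unfold convert_to_num
  rw [PySem.List.foldl_append_singleton_eq_map]
  have h0 : (PySem.List.enumerate l 0) = PySem.List.enumerate l ((0 : Nat) : Int) := by norm_num
  rw [List.nil_append, h0, pv_convert_to_num_aux l 0, pow_zero, one_mul]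
  rw [List.foldl_reverse, pv_foldr_numVal]

theorem pv_expand_eq : ∀ (k : Nat) (num : Int) (s : String), 0 < k → 0 ≤ num → num < 26 ^ k →
    (pvStep^[k] (s, num)).1 = s ++ convert_to_text_go num k := by
  intro k
  induction k with
  | zero => intro num s h; omega
  | succ j ih =>
      intro num s _ hnum hlt
      cases j with
      | zero =>
          have : PySem.Int.mod num 26 = num := by
            rw [PySem.Int.mod_eq_emod_of_pos (by norm_num)]
            exact Int.emod_eq_of_lt hnum (by simpa using hlt)
          simp only [Function.iterate_succ_apply, Function.iterate_zero_apply, pvStep,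
            convert_to_text_go, this]
      | succ j' =>
          rw [Function.iterate_succ_apply]
          have hdiv : PySem.Int.floordiv num 26 = num / 26 :=
            PySem.Int.floordiv_eq_ediv_of_pos (by norm_num)
          have h1 : 0 ≤ num / 26 := Int.ediv_nonneg hnum (by norm_num)
          have h2 : num / 26 < 26 ^ (j' + 1) := by
            rw [Int.ediv_lt_iff_lt_mul (by norm_num : (0:Int) < 26)]
            calc num < 26 ^ (j' + 1 + 1) := hlt
              _ = 26 ^ (j' + 1) * 26 := by ring
          have := ih (PySem.Int.floordiv num 26)
            (s ++ String.singleton ((PySem.List.pyGet? pvAlpha (PySem.Int.mod num 26)).getD ' '))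
            (by omega) (hdiv ▸ h1) (by rw [hdiv]; exact h2)
          simp only [pvStep] at this ⊢
          rw [this]
          show _ = s ++ convert_to_text_go num (j' + 2)
          simp only [convert_to_text_go, String.append_assoc]

-- per block-start, A's composed block function equals B's enc
theorem pv_block_eq (padded : List Char) (n a b : Int) (hn : 0 < n) (i : Int) :
    ((List.range n.toNat).foldl (fun st _ => pvStep st)
        ("", PySem.Int.mod
          (a * (PySem.List.slice padded (some i) (some (i + n))).reverse.foldl
                (fun v c => v * 26 + pvIdx c) 0 + b) (26 ^ n.toNat))).1
      = convert_to_text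
          (PySem.Int.mod (a * convert_to_num (PySem.List.slice padded (some i) (some (i + n))) + b)
            (26 ^ n.toNat)) n := by
  set blk := PySem.List.slice padded (some i) (some (i + n)) with hblk
  rw [pv_horner_eq blk]
  set num := PySem.Int.mod (a * convert_to_num blk + b) (26 ^ n.toNat) with hnum
  have hpos : (0 : Int) < 26 ^ n.toNat := by positivity
  have h0 : 0 ≤ num := PySem.Int.mod_nonneg _ hpos
  have h1 : num < 26 ^ n.toNat := by
    have h := PySem.Int.mod_lt (a * convert_to_num blk + b) hpos
    rw [← hnum] at h
    exact h
  have hk : 0 < n.toNat := by omega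
  rw [pv_foldl_ignore, List.length_range]
  rw [pv_expand_eq n.toNat num "" hk h0 h1]
  rw [convert_to_text]
  rfl

-- ===== VERDICT (by name: the statement is the Claim_ definition above) =====
theorem affine_n_encode_spec : Claim_equal_affine_n_encode := by
  intro text n a b _ hpre
  obtain ⟨hn0, _⟩ := hpre
  simp only [Spec_affine_n_encode, affine_n_encode, affine_n_encode_alt]
  have hlen : (0 : Int) ≤ PySem.Str.len text := by
    rw [PySem.Str.len_eq]; positivity
  rcases lt_trichotomy n 0 with hneg | hz | hpos
  · -- n < 0: no blocks on either side, both return "".join([])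
    rw [pv_pyRange_neg_nil 0 (PySem.Str.len text) n hneg hlen]
    simp
  · exact absurd hz hn0
  · -- n > 0: A's letter-collecting loop builds text.toList …
    rw [PySem.List.foldl_append_singleton_eq_map (f := fun c : Char => c)]
    simp only [List.map_id', List.nil_append]
    -- … its padding loop builds the same padded list as B's replicate …
    rw [pv_padlist_eq text n hpos]
    -- … and its three remaining loops are maps over the same block starts
    rw [PySem.List.foldl_append_singleton_eq_map]
    rw [PySem.List.foldl_append_singleton_eq_map]
    rw [PySem.List.foldl_append_singleton_eq_map]
    simp only [List.nil_append, List.map_map]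
    congr 1
    apply List.map_congr_left
    intro i _
    simp only [Function.comp]
    exact (pv_block_eq (text.toList ++
      List.replicate (PySem.Int.mod (-PySem.Str.len text) n).toNat 'X') n a b hpos i).symm
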